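-- pv_equiv track=rewrite | github.com/kuznetsovvj/education | algorithms/codeforces/1650a.py | solution
-- ===== SOURCE A (Python) =====
-- def solution(w, c):
--     if c not in w:
--         return "NO"
--     pos = 0
--     while True:
--         pos = w.find(c, pos)
--         if pos == -1:
--             break
--         if (pos + 1) % 2 != 0:
--             if len(w) == 3 and pos == 1:
--                 pos += 1
--                 continue
--             return "YES"
--         else:
--             pos += 1
--     return "NO"
-- ===== SOURCE B (Python) =====
-- def solution(w, c):
--     for i in range(0, len(w) + 1, 2):
--         if w.startswith(c, i):
--             return "YES"
--     return "NO"
-- ===== Notes on version B (the rewrite author's own statement) =====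
-- stated objective: simpler
-- what changed: A's find-loop with parity-based advancement and a dead len==3 branch is replaced by a direct scan of the even start positions with startswith; the 'c in w' pre-check disappears.
import Mathlib
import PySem

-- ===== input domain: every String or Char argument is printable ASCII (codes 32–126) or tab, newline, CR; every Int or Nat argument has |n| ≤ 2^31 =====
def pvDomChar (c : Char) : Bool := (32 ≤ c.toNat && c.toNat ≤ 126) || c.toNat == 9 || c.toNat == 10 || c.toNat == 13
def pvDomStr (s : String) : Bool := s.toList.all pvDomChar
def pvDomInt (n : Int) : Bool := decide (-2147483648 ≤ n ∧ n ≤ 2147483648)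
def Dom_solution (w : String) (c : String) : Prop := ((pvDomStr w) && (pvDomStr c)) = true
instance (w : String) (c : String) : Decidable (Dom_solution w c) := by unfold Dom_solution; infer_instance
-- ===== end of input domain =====

-- B replaces A's repeated w.find(c, pos) loop (with parity advancement and a dead len==3 branch)
-- by a direct scan of the even start positions with startswith; objective: simpler.


-- ===== PORT A =====
-- A's `while True` loop: pos = w.find(c, pos); break on -1; return YES on an even
-- 0-indexed hit (with the len==3/pos==1 sub-branch kept verbatim); else pos += 1.
-- The loop advances pos by at least 1 per iteration and stops once pos > len(w),
-- so fuel len(w)+2 is never exhausted (the fuel-0 arm is unreachable).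
def pvLoopA (s c : List Char) (pos : Int) : Nat → String
  | 0 => "NO"
  | f + 1 =>
    let p := PySem.Chars.findFrom s c pos
    if p = -1 then "NO"
    else if PySem.Int.mod (p + 1) 2 ≠ 0 then
      if (s.length : Int) = 3 ∧ p = 1 then pvLoopA s c (p + 1) f
      else "YES"
    else pvLoopA s c (p + 1) f

def solution (w : String) (c : String) : String :=
  if ¬ PySem.Chars.isIn c.toList w.toList then "NO"
  else pvLoopA w.toList c.toList 0 (w.toList.length + 2)

-- ===== PORT B =====
-- Source B: for i in range(0, len(w)+1, 2): if w.startswith(c, i): return "YES"; return "NO".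
-- Python w.startswith(c, i) for 0 ≤ i ≤ len(w) (all i produced by the range) is exactly
-- "c is a prefix of the suffix of w starting at i".
def pvLoopB (s c : List Char) : List Int → String
  | [] => "NO"
  | i :: rest =>
    if PySem.Chars.startswith (s.drop i.toNat) c then "YES" else pvLoopB s c rest

def solution_alt (w : String) (c : String) : String :=
  pvLoopB w.toList c.toList (PySem.List.pyRange 0 ((w.toList.length : Int) + 1) 2)

-- ===== PRECONDITION & SPEC =====
def Spec_solution (w : String) (c : String) (out : String) : Prop := out = solution_alt w c
instance (w : String) (c : String) (out : String) : Decidable (Spec_solution w c out) := by unfold Spec_solution; infer_instance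

-- ===== CLAIM (what is proved, stated in full; the proofs are below) =====
def Claim_equal_solution : Prop := ∀ (w : String) (c : String), Dom_solution w c → Spec_solution w c (solution w c)

-- ===== LEMMAS AND PROOFS =====

-- find with a start past the end of the string yields -1 (CPython's rule, kept by PySem).
lemma findFrom_past_end (s c : List Char) (k : Int) (h0 : 0 ≤ k)
    (h : (s.length : Int) < k) : PySem.Chars.findFrom s c k = -1 := by
  simp only [PySem.Chars.findFrom]
  split_ifs with h1 h2 h3 <;> omega

-- a found index never exceeds the length of the string
lemma findFrom_le_length (s c : List Char) (k : Nat) (hk : k ≤ s.length)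
    (_h : PySem.Chars.findFrom s c (k : Int) ≠ -1) :
    PySem.Chars.findFrom s c (k : Int) ≤ (s.length : Int) := by
  rw [PySem.Chars.findFrom_natCast s c k hk] at *
  have := PySem.Chars.find_le_length (s.drop k) c
  simp only [List.length_drop] at this
  split_ifs with hf
  · omega
  · omega

lemma loopA_dichotomy (s c : List Char) : ∀ (f : Nat) (pos : Int),
    pvLoopA s c pos f = "YES" ∨ pvLoopA s c pos f = "NO" := by
  intro f
  induction f with
  | zero => intro pos; right; rfl
  | succ f ih =>
    intro pos
    simp only [pvLoopA]
    split_ifs with h1 h2 h3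
    · right; rfl
    · exact ih _
    · left; rfl
    · exact ih _

lemma loopB_dichotomy (s c : List Char) : ∀ (l : List Int),
    pvLoopB s c l = "YES" ∨ pvLoopB s c l = "NO" := by
  intro l
  induction l with
  | nil => right; rfl
  | cons i rest ih =>
    simp only [pvLoopB]
    split_ifs with h
    · left; rfl
    · exact ih

-- characterization of A's loop: starting at a natural position k it answers YES
-- exactly when c occurs at some even index j with k ≤ j ≤ len(s)
lemma loopA_iff (s c : List Char) : ∀ (f : Nat) (k : Nat),
    k ≤ s.length + 1 → s.length + 2 ≤ k + f →
    (pvLoopA s c (k : Int) f = "YES" ↔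
      ∃ j : Nat, k ≤ j ∧ j ≤ s.length ∧ j % 2 = 0 ∧ c <+: s.drop j) := by
  intro f
  induction f with
  | zero => intro k hk hf; omega
  | succ f ih =>
    intro k hk hf
    by_cases hklen : k ≤ s.length
    · by_cases hp : PySem.Chars.findFrom s c (k : Int) = -1
      · simp only [pvLoopA]
        rw [if_pos hp]
        refine iff_of_false (by decide) ?_
        rintro ⟨j, hkj, hjlen, -, hpre⟩
        have hnone := (PySem.Chars.findFrom_natCast_eq_neg_one_iff s c k hklen).mp hp
        apply hnone
        have hdrop : s.drop j = (s.drop k).drop (j - k) := by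
          rw [List.drop_drop]; congr 1; omega
        rw [hdrop] at hpre
        exact hpre.isInfix.trans (List.drop_suffix _ _).isInfix
      · obtain ⟨hkp, hpre, hmin⟩ := PySem.Chars.findFrom_natCast_spec s c k hklen hp
        have hple := findFrom_le_length s c k hklen hp
        set p := PySem.Chars.findFrom s c (k : Int) with hpdef
        have hp0 : 0 ≤ p := le_trans (by exact_mod_cast Int.natCast_nonneg k) hkp
        have hpm : p = (p.toNat : Int) := (Int.toNat_of_nonneg hp0).symm
        set m := p.toNat with hmdef
        have hkm : k ≤ m := by omega
        have hmlen : m ≤ s.length := by omega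
        have hmod : PySem.Int.mod (p + 1) 2 = (p + 1) % 2 :=
          PySem.Int.mod_eq_emod_of_pos (by norm_num)
        by_cases hm : m % 2 = 0
        · -- even hit: A answers YES
          have hcond : PySem.Int.mod (p + 1) 2 ≠ 0 := by rw [hmod]; omega
          have hdead : ¬ ((s.length : Int) = 3 ∧ p = 1) := by
            rintro ⟨-, h1⟩; omega
          simp only [pvLoopA, ← hpdef]
          rw [if_neg hp, if_pos hcond, if_neg hdead]
          exact iff_of_true rfl ⟨m, hkm, hmlen, hm, hpre⟩
        · -- odd hit: A advances to p + 1
          have hcond : ¬ PySem.Int.mod (p + 1) 2 ≠ 0 := by rw [hmod]; omega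
          have hstep : p + 1 = ((m + 1 : Nat) : Int) := by push_cast; omega
          have hrec := ih (m + 1) (by omega) (by omega)
          simp only [pvLoopA, ← hpdef]
          rw [if_neg hp, if_neg hcond, hstep, hrec]
          constructor
          · rintro ⟨j, hj1, hj2, hj3, hj4⟩; exact ⟨j, by omega, hj2, hj3, hj4⟩
          · rintro ⟨j, hj1, hj2, hj3, hj4⟩
            refine ⟨j, ?_, hj2, hj3, hj4⟩
            by_contra hlt
            rcases Nat.lt_or_ge j m with hjm | hjm
            · exact hmin j hj1 hjm hj4
            · have : j = m := by omega
              omega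
    · -- k = len + 1: find past the end, loop breaks
      have hk1 : k = s.length + 1 := by omega
      have hp : PySem.Chars.findFrom s c (k : Int) = -1 :=
        findFrom_past_end s c _ (by omega) (by omega)
      simp only [pvLoopA]
      rw [if_pos hp]
      refine iff_of_false (by decide) ?_
      rintro ⟨j, hj1, hj2, -, -⟩; omega

-- characterization of B's loop
lemma loopB_iff (s c : List Char) : ∀ (l : List Int),
    (pvLoopB s c l = "YES" ↔ ∃ i ∈ l, PySem.Chars.startswith (s.drop i.toNat) c = true) := by
  intro l
  induction l with
  | nil => simp [pvLoopB]
  | cons i rest ih =>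
    simp only [pvLoopB]
    split_ifs with h
    · exact iff_of_true rfl ⟨i, by simp, h⟩
    · rw [ih]
      constructor
      · rintro ⟨j, hj, hsw⟩; exact ⟨j, List.mem_cons_of_mem _ hj, hsw⟩
      · rintro ⟨j, hj, hsw⟩
        rcases List.mem_cons.mp hj with rfl | hj'
        · exact absurd hsw (by simp [h])
        · exact ⟨j, hj', hsw⟩

lemma eq_of_yes_iff (a b : String) (ha : a = "YES" ∨ a = "NO")
    (hb : b = "YES" ∨ b = "NO") (h : (a = "YES" ↔ b = "YES")) : a = b := by
  rcases ha with rfl | rfl <;> rcases hb with rfl | rfl <;> simp_all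

-- B answers YES exactly when c occurs at some even index j ≤ len(s)
lemma alt_iff (s c : List Char) :
    (pvLoopB s c (PySem.List.pyRange 0 ((s.length : Int) + 1) 2) = "YES" ↔
      ∃ j : Nat, j ≤ s.length ∧ j % 2 = 0 ∧ c <+: s.drop j) := by
  rw [loopB_iff]
  constructor
  · rintro ⟨i, hi, hsw⟩
    rw [PySem.List.mem_pyRange_iff_of_pos (by norm_num)] at hi
    obtain ⟨hi0, hilt, hdvd⟩ := hi
    refine ⟨i.toNat, by omega, by omega, ?_⟩
    exact (PySem.Chars.startswith_iff _ _).mp hsw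
  · rintro ⟨j, hjlen, hje, hpre⟩
    refine ⟨(j : Int), ?_, ?_⟩
    · rw [PySem.List.mem_pyRange_iff_of_pos (by norm_num)]
      refine ⟨by positivity, by omega, by omega⟩
    · rw [Int.toNat_natCast]
      exact (PySem.Chars.startswith_iff _ _).mpr hpre

-- ===== VERDICT (by name: the statement is the Claim_ definition above) =====
theorem solution_spec : Claim_equal_solution := by
  intro w c _
  unfold Spec_solution solution solution_alt
  set s := w.toList
  set cs := c.toList
  by_cases hin : PySem.Chars.isIn cs s
  · rw [if_neg (by simp [hin])]
    apply eq_of_yes_iff _ _ (loopA_dichotomy s cs _ _) (loopB_dichotomy s cs _)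
    rw [alt_iff s cs]
    have hA := loopA_iff s cs (s.length + 2) 0 (by omega) (by omega)
    rw [Nat.cast_zero] at hA
    rw [hA]
    constructor
    · rintro ⟨j, -, h2, h3, h4⟩; exact ⟨j, h2, h3, h4⟩
    · rintro ⟨j, h2, h3, h4⟩; exact ⟨j, Nat.zero_le _, h2, h3, h4⟩
  · rw [if_pos (by simp [hin])]
    rcases loopB_dichotomy s cs (PySem.List.pyRange 0 ((s.length : Int) + 1) 2) with hy | hn
    · exfalso
      obtain ⟨j, hjlen, -, hpre⟩ := (alt_iff s cs).mp hy
      exact hin ((PySem.Chars.isIn_iff_infix _ _).mpr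
        (hpre.isInfix.trans (List.drop_suffix _ _).isInfix))
    · exact hn.symm
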